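-- pv_equiv track=rewrite | github.com/EmmanuelOlatunde/progress_api | progress/views.py | _calculate_current_streak_from_data
-- ===== SOURCE A (Python) =====
-- def _calculate_current_streak_from_data(daily_activity):
--     """Calculate what the current streak should be based on activity data"""
--     current_streak = 0
--
--     for day in daily_activity:  # Should be ordered from oldest to newest
--         if day['has_activity']:
--             current_streak += 1
--         else:
--             current_streak = 0  # Reset streak on inactive day
--
--     return current_streak
-- ===== SOURCE B (Python) =====
-- from itertools import takewhile
--
-- def _calculate_current_streak_from_data(daily_activity):
--     """Length of the trailing run of active days: scan newest-to-oldest, stop at first inactive."""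
--     return sum(1 for _ in takewhile(lambda day: day['has_activity'], reversed(daily_activity)))
-- ===== Notes on version B (the rewrite author's own statement) =====
-- stated objective: simpler
-- what changed: Replaces the full forward scan with accumulate-and-reset state by a reverse traversal that counts the trailing active run via takewhile, stopping at the first inactive day.
import Mathlib
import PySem

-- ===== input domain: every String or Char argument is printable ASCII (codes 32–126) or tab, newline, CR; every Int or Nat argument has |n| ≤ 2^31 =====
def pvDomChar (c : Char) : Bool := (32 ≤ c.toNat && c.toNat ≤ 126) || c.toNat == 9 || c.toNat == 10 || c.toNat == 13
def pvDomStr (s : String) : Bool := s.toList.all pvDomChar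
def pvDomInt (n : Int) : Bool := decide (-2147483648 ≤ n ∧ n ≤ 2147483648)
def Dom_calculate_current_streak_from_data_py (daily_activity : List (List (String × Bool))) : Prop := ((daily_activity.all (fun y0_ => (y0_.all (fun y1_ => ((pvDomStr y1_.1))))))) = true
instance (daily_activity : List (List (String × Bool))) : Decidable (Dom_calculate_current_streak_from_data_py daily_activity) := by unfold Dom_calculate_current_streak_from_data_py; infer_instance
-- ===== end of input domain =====

-- B counts the trailing active run by a reverse scan with takewhile, instead of A's full
-- forward scan with accumulate-and-reset state (same cost; simpler direct computation).

-- day['has_activity'] on an association-list dict: first matching key (KeyError → none, excluded by Pre_)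
def pvHasActivity (day : List (String × Bool)) : Bool :=
  ((day.find? (fun kv => kv.1 == "has_activity")).map (fun kv => kv.2)).getD false

-- ===== PORT A =====
def calculate_current_streak_from_data_py (daily_activity : List (List (String × Bool))) : Int :=
  daily_activity.foldl (fun current_streak day =>
    if pvHasActivity day then current_streak + 1 else 0) 0

-- ===== PORT B =====
def calculate_current_streak_from_data_py_alt (daily_activity : List (List (String × Bool))) : Int :=
  ((daily_activity.reverse.takeWhile pvHasActivity).length : Int)

-- ===== PRECONDITION & SPEC =====
-- Pre_ excludes exactly the inputs where some day lacks the key 'has_activity': there the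
-- Python A raises KeyError (and B raises too when it reaches such a day).
def Pre_calculate_current_streak_from_data_py (daily_activity : List (List (String × Bool))) : Prop :=
  ∀ day ∈ daily_activity, (day.any (fun kv => kv.1 == "has_activity")) = true
instance (daily_activity : List (List (String × Bool))) : Decidable (Pre_calculate_current_streak_from_data_py daily_activity) := by unfold Pre_calculate_current_streak_from_data_py; infer_instance

def pvWitness_calculate_current_streak_from_data_py : (List (List (String × Bool))) :=
  [[("has_activity", true)], [("has_activity", false)], [("has_activity", true)]]

def Spec_calculate_current_streak_from_data_py (daily_activity : List (List (String × Bool))) (out : Int) : Prop := out = calculate_current_streak_from_data_py_alt daily_activity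
instance (daily_activity : List (List (String × Bool))) (out : Int) : Decidable (Spec_calculate_current_streak_from_data_py daily_activity out) := by unfold Spec_calculate_current_streak_from_data_py; infer_instance

-- ===== CLAIM (what is proved, stated in full; the proofs are below) =====
def Claim_equal_calculate_current_streak_from_data_py : Prop := ∀ (daily_activity : List (List (String × Bool))), Dom_calculate_current_streak_from_data_py daily_activity → Pre_calculate_current_streak_from_data_py daily_activity → Spec_calculate_current_streak_from_data_py daily_activity (calculate_current_streak_from_data_py daily_activity)

-- ===== LEMMAS AND PROOFS =====

-- The accumulate-and-reset fold equals the trailing run length, plus the start value iff every day is active.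
theorem streak_foldl_eq (p : List (String × Bool) → Bool) (l : List (List (String × Bool))) :
    ∀ acc : Int, l.foldl (fun a d => if p d then a + 1 else 0) acc
      = ((l.reverse.takeWhile p).length : Int) + (if l.all p then acc else 0) := by
  induction l using List.reverseRecOn with
  | nil => intro acc; simp
  | append_singleton m x ih =>
    intro acc
    rw [List.foldl_append]
    simp only [List.foldl_cons, List.foldl_nil, List.reverse_append, List.reverse_cons,
      List.reverse_nil, List.nil_append, List.cons_append, List.takeWhile, List.all_append,
      List.all_cons, List.all_nil]
    cases hx : p x with
    | false => simp
    | true => rw [ih acc]; cases m.all p <;> simp <;> omega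

theorem calculate_current_streak_from_data_py_spec : Claim_equal_calculate_current_streak_from_data_py := by
  intro l _ _
  show calculate_current_streak_from_data_py l = calculate_current_streak_from_data_py_alt l
  unfold calculate_current_streak_from_data_py calculate_current_streak_from_data_py_alt
  rw [streak_foldl_eq]
  cases l.all pvHasActivity <;> simp
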